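-- pv_equiv track=rewrite | github.com/wojmichaluk/ASD-2022-2023 | cwiczenia/13/2.py | block_tower
-- ===== SOURCE A (Python) =====
-- def block_tower(A,tab,top,i):
--     if i==0:
--         top[i]=A[i]
--         tab[0]=0
--         return 0
--     if tab[i]==-1:
--         min_take=float('inf')
--         b=float('inf')
--         for j in range(i):
--             b=block_tower(A,tab,top,j)+(i-j-1)
--             if upper(A[i],top[j]) and b<min_take:
--                 min_take=b
--         tab[i]=min(block_tower(A,tab,top,i-1)+1,min_take,i)
--         if tab[i]==block_tower(A,tab,top,i-1)+1: top[i]=top[i-1]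
--         else: top[i]=A[i]
--     return tab[i]
--
-- def upper(el,t):
--     return el[0]>=t[0] and el[1]<=t[1]
-- ===== SOURCE B (Python) =====
-- # Iterative bottom-up DP replacing A's memoized recursion; mutates tab/top like A; return value proved equal.
-- def upper(el, t):
--     return el[0] >= t[0] and el[1] <= t[1]
--
-- def block_tower(A, tab, top, i):
--     if i != 0 and tab[i] != -1:
--         return tab[i]
--     tab[0] = 0
--     top[0] = A[0]
--     for j in range(1, i + 1):
--         if tab[j] == -1:
--             best = float('inf')
--             for k in range(j):
--                 if upper(A[j], top[k]):
--                     best = min(best, tab[k] + j - k - 1)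
--             new = min(tab[j - 1] + 1, best, j)
--             top[j] = top[j - 1] if new == tab[j - 1] + 1 else A[j]
--             tab[j] = new
--     return tab[i]
-- ===== Notes on version B (the rewrite author's own statement) =====
-- stated objective: simpler
-- what changed: Replaced A's memoized top-down recursion (which re-enters block_tower for every j in an inner loop and calls itself twice more per entry) by a single iterative bottom-up loop that fills tab/top in index order.
-- outside the precondition, e.g. on block_tower([(1, 1), (1, 1)], [5, -1, 7], [(0, 0), (0, 0)], -2): A returns -2, B returns -1
import Mathlib
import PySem

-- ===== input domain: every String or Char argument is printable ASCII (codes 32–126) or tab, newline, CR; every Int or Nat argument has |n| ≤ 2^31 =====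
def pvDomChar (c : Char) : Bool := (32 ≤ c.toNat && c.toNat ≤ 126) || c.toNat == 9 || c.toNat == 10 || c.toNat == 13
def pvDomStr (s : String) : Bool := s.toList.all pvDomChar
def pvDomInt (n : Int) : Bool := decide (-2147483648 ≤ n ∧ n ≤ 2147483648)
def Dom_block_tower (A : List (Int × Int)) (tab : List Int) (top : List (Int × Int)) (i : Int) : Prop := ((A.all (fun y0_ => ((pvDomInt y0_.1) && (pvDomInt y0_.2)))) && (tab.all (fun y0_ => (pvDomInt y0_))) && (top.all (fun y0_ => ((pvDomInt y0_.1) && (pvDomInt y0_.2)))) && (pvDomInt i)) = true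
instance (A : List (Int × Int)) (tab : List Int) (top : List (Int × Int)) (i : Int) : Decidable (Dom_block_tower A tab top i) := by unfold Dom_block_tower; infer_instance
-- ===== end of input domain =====

-- B replaces A's memoized top-down recursion by one iterative bottom-up DP loop (simpler; same O(n^2) cost).
-- Both Pythons mutate tab/top in place (identically, as fuzz-tested); the equivalence proved here is about the RETURN value.

-- ===== PORT A =====
-- default pair for out-of-range reads; unreachable under Pre_block_tower
def pvD0 : Int × Int := (0, 0)

-- helper `upper(el, t)` shared by both Python sources
def upperFn (el t : Int × Int) : Bool := decide (t.1 ≤ el.1) && decide (el.2 ≤ t.2)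

-- `b < mt` where `mt` may be float('inf') (= none)
def infGt (mt : Option Int) (b : Int) : Bool := match mt with | none => true | some m => decide (b < m)

-- Python's min(c, mt, i) where `mt` may be float('inf') (= none)
def pyMin3 (c : Int) (mt : Option Int) (i : Int) : Int :=
  match mt with | none => min c i | some m => min (min c m) i

-- Python's min(best, x) where `best` may be float('inf') (= none)
def pyMinOpt (best : Option Int) (x : Int) : Option Int :=
  some (match best with | none => x | some m => min m x)

mutual
-- A's recursive `block_tower` for a Nat index: returns (value, tab, top) threading the list mutations
def blockTowerRec (A : List (Int × Int)) (tab : List Int) (top : List (Int × Int)) (i : Nat) :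
    Int × List Int × List (Int × Int) :=
  if h : i = 0 then
    (0, PySem.List.pySetD tab 0 0, PySem.List.pySetD top 0 (PySem.List.pyGetD A 0 pvD0))
  else if PySem.List.pyGetD tab (i : Int) 0 = -1 then
    let s := blockTowerLoop A tab top i 0 i none
    let r1 := blockTowerRec A s.1 s.2.1 (i - 1)
    let newv : Int := pyMin3 (r1.1 + 1) s.2.2 (i : Int)   -- min(block_tower(i-1)+1, min_take, i)
    let tab2 := PySem.List.pySetD r1.2.1 (i : Int) newv
    let r2 := blockTowerRec A tab2 r1.2.2 (i - 1)   -- the second call in `if tab[i]==block_tower(...,i-1)+1`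
    let top3 := if newv = r2.1 + 1
      then PySem.List.pySetD r2.2.2 (i : Int) (PySem.List.pyGetD r2.2.2 ((i : Int) - 1) pvD0)
      else PySem.List.pySetD r2.2.2 (i : Int) (PySem.List.pyGetD A (i : Int) pvD0)
    (PySem.List.pyGetD r2.2.1 (i : Int) 0, r2.2.1, top3)
  else
    (PySem.List.pyGetD tab (i : Int) 0, tab, top)
termination_by (i, 1, 0)
decreasing_by all_goals (simp [Prod.lex_def] <;> omega)

-- A's `for j in range(i)` loop, carrying (tab, top, min_take); min_take none = float('inf')
def blockTowerLoop (A : List (Int × Int)) (tab : List Int) (top : List (Int × Int))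
    (iN j r : Nat) (mt : Option Int) : List Int × List (Int × Int) × Option Int :=
  match r with
  | 0 => (tab, top, mt)
  | Nat.succ r' =>
    let c := blockTowerRec A tab top j
    let b := c.1 + ((iN : Int) - (j : Int) - 1)
    let pass := upperFn (PySem.List.pyGetD A (iN : Int) pvD0) (PySem.List.pyGetD c.2.2 (j : Int) pvD0)
      && infGt mt b
    blockTowerLoop A c.2.1 c.2.2 iN (j + 1) r' (if pass then some b else mt)
termination_by (j + r, 0, r)
decreasing_by all_goals (simp [Prod.lex_def] <;> omega)
end

def block_tower (A : List (Int × Int)) (tab : List Int) (top : List (Int × Int)) (i : Int) : Int :=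
  if 0 ≤ i then (blockTowerRec A tab top i.toNat).1
  else if PySem.List.pyGetD tab i 0 = -1 then 0  -- totalization guard: Python recurses through negative indices here (outside Pre_)
  else PySem.List.pyGetD tab i 0

-- ===== PORT B =====
-- B's inner loop: best = min over k < jN with upper(A[jN], top[k]) of tab[k]+jN-k-1 (none = float('inf'))
def blockTowerAltInner (A : List (Int × Int)) (tab : List Int) (top : List (Int × Int))
    (jN k r : Nat) (best : Option Int) : Option Int :=
  match r with
  | 0 => best
  | Nat.succ r' =>
    let best' := if upperFn (PySem.List.pyGetD A (jN : Int) pvD0) (PySem.List.pyGetD top (k : Int) pvD0)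
      then pyMinOpt best (PySem.List.pyGetD tab (k : Int) 0 + ((jN : Int) - (k : Int) - 1))
      else best
    blockTowerAltInner A tab top jN (k + 1) r' best'

-- B's `for j in range(1, i+1)` loop, filling tab/top in place
def blockTowerAltLoop (A : List (Int × Int)) (tab : List Int) (top : List (Int × Int))
    (j r : Nat) : List Int × List (Int × Int) :=
  match r with
  | 0 => (tab, top)
  | Nat.succ r' =>
    if PySem.List.pyGetD tab (j : Int) 0 = -1 then
      let best := blockTowerAltInner A tab top j 0 j none
      let prev := PySem.List.pyGetD tab ((j : Int) - 1) 0
      let newv : Int := pyMin3 (prev + 1) best (j : Int)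
      let top' := PySem.List.pySetD top (j : Int)
        (if newv = prev + 1 then PySem.List.pyGetD top ((j : Int) - 1) pvD0
         else PySem.List.pyGetD A (j : Int) pvD0)
      let tab' := PySem.List.pySetD tab (j : Int) newv
      blockTowerAltLoop A tab' top' (j + 1) r'
    else blockTowerAltLoop A tab top (j + 1) r'

def block_tower_alt (A : List (Int × Int)) (tab : List Int) (top : List (Int × Int)) (i : Int) : Int :=
  if i ≠ 0 ∧ PySem.List.pyGetD tab i 0 ≠ -1 then PySem.List.pyGetD tab i 0
  else
    let tab1 := PySem.List.pySetD tab 0 0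
    let top1 := PySem.List.pySetD top 0 (PySem.List.pyGetD A 0 pvD0)
    let s := blockTowerAltLoop A tab1 top1 1 i.toNat
    PySem.List.pyGetD s.1 i 0

-- ===== PRECONDITION & SPEC =====
-- Pre_ requires i to be a valid index of tab and, exactly when entry i must actually be computed
-- (i = 0 or tab[i] == -1), restricts to the natural DP domain 0 ≤ i with A and top long enough (else
-- Python raises IndexError, or — for negative i with tab[i] == -1 — recurses through wrapped negative
-- indices, an accident of Python's negative-index wraparound, not part of the function's purpose).
def Pre_block_tower (A : List (Int × Int)) (tab : List Int) (top : List (Int × Int)) (i : Int) : Prop :=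
  PySem.Raise.InRange tab.length i ∧
  ((i = 0 ∨ PySem.List.pyGetD tab i 0 = -1) →
    (0 ≤ i ∧ i < (A.length : Int) ∧ i < (top.length : Int)))
instance (A : List (Int × Int)) (tab : List Int) (top : List (Int × Int)) (i : Int) : Decidable (Pre_block_tower A tab top i) := by unfold Pre_block_tower; infer_instance

def pvWitness_block_tower : (List (Int × Int)) × List Int × (List (Int × Int)) × Int :=
  ([(1, 2), (2, 1)], [-1, -1], [(0, 0), (0, 0)], 1)

def Spec_block_tower (A : List (Int × Int)) (tab : List Int) (top : List (Int × Int)) (i : Int) (out : Int) : Prop := out = block_tower_alt A tab top i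
instance (A : List (Int × Int)) (tab : List Int) (top : List (Int × Int)) (i : Int) (out : Int) : Decidable (Spec_block_tower A tab top i out) := by unfold Spec_block_tower; infer_instance

-- ===== CLAIM (what is proved, stated in full; the proofs are below) =====
def Claim_equal_block_tower : Prop := ∀ (A : List (Int × Int)) (tab : List Int) (top : List (Int × Int)) (i : Int), Dom_block_tower A tab top i → Pre_block_tower A tab top i → Spec_block_tower A tab top i (block_tower A tab top i)

-- ===== LEMMAS AND PROOFS =====

-- The mathematical recurrence both programs compute: (specVT j).1 / .2 are the final tab[j] / top[j]
-- values determined by the ORIGINAL tab0/top0 (memo hits keep their preset values; -1 entries are computed).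
mutual
def specVT (A : List (Int × Int)) (tab0 : List Int) (top0 : List (Int × Int)) (j : Nat) : Int × (Int × Int) :=
  if _h : j = 0 then (0, PySem.List.pyGetD A 0 pvD0)
  else if PySem.List.pyGetD tab0 (j : Int) 0 = -1 then
    let mt := specMin A tab0 top0 j 0 j none
    let p := specVT A tab0 top0 (j - 1)
    let v : Int := pyMin3 (p.1 + 1) mt (j : Int)
    (v, if v = p.1 + 1 then p.2 else PySem.List.pyGetD A (j : Int) pvD0)
  else (PySem.List.pyGetD tab0 (j : Int) 0, PySem.List.pyGetD top0 (j : Int) pvD0)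
termination_by (j, 1, 0)
decreasing_by all_goals (simp [Prod.lex_def] <;> omega)

def specMin (A : List (Int × Int)) (tab0 : List Int) (top0 : List (Int × Int))
    (jN k r : Nat) (mt : Option Int) : Option Int :=
  match r with
  | 0 => mt
  | Nat.succ r' =>
    let p := specVT A tab0 top0 k
    let b := p.1 + ((jN : Int) - (k : Int) - 1)
    let pass := upperFn (PySem.List.pyGetD A (jN : Int) pvD0) p.2
      && infGt mt b
    specMin A tab0 top0 jN (k + 1) r' (if pass then some b else mt)
termination_by (k + r, 0, r)
decreasing_by all_goals (simp [Prod.lex_def] <;> omega)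
end

lemma pvGetD_set_self {α : Type} (l : List α) (n : Nat) (v d : α) (h : n < l.length) :
    (l.set n v).getD n d = v := by
  simp [List.getD_eq_getElem?_getD, h]

lemma pvGetD_set_ne {α : Type} (l : List α) (n m : Nat) (v d : α) (h : m ≠ n) :
    (l.set n v).getD m d = l.getD m d := by
  simp [List.getD_eq_getElem?_getD, List.getElem?_set_ne (by omega : n ≠ m)]

-- invariant on intermediate (tab, top) states: below n, every entry is either still the original
-- one or already its final specVT value
def GoodUpTo (A : List (Int × Int)) (tab0 : List Int) (top0 : List (Int × Int)) (n : Nat)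
    (tab : List Int) (top : List (Int × Int)) : Prop :=
  tab.length = tab0.length ∧ top.length = top0.length ∧
  ∀ j : Nat, j < n →
    (tab.getD j 0 = tab0.getD j 0 ∧ top.getD j pvD0 = top0.getD j pvD0) ∨
    (tab.getD j 0 = (specVT A tab0 top0 j).1 ∧ top.getD j pvD0 = (specVT A tab0 top0 j).2)

-- postcondition of A's recursion at index i
def RecPost (A : List (Int × Int)) (tab0 : List Int) (top0 : List (Int × Int)) (n i : Nat)
    (tab : List Int) (top : List (Int × Int)) : Prop :=
  (blockTowerRec A tab top i).1 = (specVT A tab0 top0 i).1 ∧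
  GoodUpTo A tab0 top0 n (blockTowerRec A tab top i).2.1 (blockTowerRec A tab top i).2.2 ∧
  (blockTowerRec A tab top i).2.1.getD i 0 = (specVT A tab0 top0 i).1 ∧
  (blockTowerRec A tab top i).2.2.getD i pvD0 = (specVT A tab0 top0 i).2 ∧
  ∀ m : Nat, i < m →
    (blockTowerRec A tab top i).2.1.getD m 0 = tab.getD m 0 ∧
    (blockTowerRec A tab top i).2.2.getD m pvD0 = top.getD m pvD0

lemma loop_post (A : List (Int × Int)) (tab0 : List Int) (top0 : List (Int × Int)) (iN : Nat)
    (IH : ∀ j, j < iN → ∀ n, j < n → ∀ tab top, GoodUpTo A tab0 top0 n tab top → RecPost A tab0 top0 n j tab top) :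
    ∀ r j mt tab top n, j + r ≤ iN → iN < n → GoodUpTo A tab0 top0 n tab top →
      GoodUpTo A tab0 top0 n (blockTowerLoop A tab top iN j r mt).1 (blockTowerLoop A tab top iN j r mt).2.1 ∧
      (blockTowerLoop A tab top iN j r mt).2.2 = specMin A tab0 top0 iN j r mt ∧
      ∀ m : Nat, j + r ≤ m →
        (blockTowerLoop A tab top iN j r mt).1.getD m 0 = tab.getD m 0 ∧
        (blockTowerLoop A tab top iN j r mt).2.1.getD m pvD0 = top.getD m pvD0 := by
  intro r
  induction r with
  | zero =>
    intro j mt tab top n _ _ hG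
    have h0 : blockTowerLoop A tab top iN j 0 mt = (tab, top, mt) := by rw [blockTowerLoop.eq_def]
    rw [h0]
    exact ⟨hG, by rw [specMin.eq_def], fun m _ => ⟨rfl, rfl⟩⟩
  | succ r' ihr =>
    intro j mt tab top n hle hn hG
    have hjiN : j < iN := by omega
    obtain ⟨Rv, RG, Rtab, Rtop, Rpres⟩ := IH j hjiN n (by omega) tab top hG
    have hsm : specMin A tab0 top0 iN j (r' + 1) mt =
        specMin A tab0 top0 iN (j + 1) r'
          (if (upperFn (A.getD iN pvD0) ((specVT A tab0 top0 j).2)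
              && infGt mt ((specVT A tab0 top0 j).1 + ((iN : Int) - (j : Int) - 1))) = true
           then some ((specVT A tab0 top0 j).1 + ((iN : Int) - (j : Int) - 1)) else mt) := by
      rw [specMin.eq_def]
      simp only [PySem.List.pyGetD_natCast, List.getD_eq_getElem?_getD]
    have hstep : blockTowerLoop A tab top iN j (r' + 1) mt =
        blockTowerLoop A (blockTowerRec A tab top j).2.1 (blockTowerRec A tab top j).2.2 iN (j + 1) r'
          (if (upperFn (A.getD iN pvD0) ((blockTowerRec A tab top j).2.2.getD j pvD0)
              && infGt mt ((blockTowerRec A tab top j).1 + ((iN : Int) - (j : Int) - 1))) = true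
           then some ((blockTowerRec A tab top j).1 + ((iN : Int) - (j : Int) - 1)) else mt) := by
      rw [blockTowerLoop.eq_def]
      simp only [PySem.List.pyGetD_natCast, List.getD_eq_getElem?_getD]
    rw [hstep, Rtop, Rv]
    obtain ⟨LG, Lmt, Lpres⟩ := ihr (j + 1)
      (if (upperFn (A.getD iN pvD0) ((specVT A tab0 top0 j).2)
          && infGt mt ((specVT A tab0 top0 j).1 + ((iN : Int) - (j : Int) - 1))) = true
       then some ((specVT A tab0 top0 j).1 + ((iN : Int) - (j : Int) - 1)) else mt)
      (blockTowerRec A tab top j).2.1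
      (blockTowerRec A tab top j).2.2 n (by omega) hn RG
    refine ⟨LG, Lmt.trans hsm.symm, ?_⟩
    intro m hm
    obtain ⟨P1, P2⟩ := Lpres m (by omega)
    obtain ⟨Q1, Q2⟩ := Rpres m (by omega)
    exact ⟨P1.trans Q1, P2.trans Q2⟩

lemma rec_post (A : List (Int × Int)) (tab0 : List Int) (top0 : List (Int × Int)) :
    ∀ i : Nat, i < tab0.length → i < top0.length → ∀ n, i < n →
    ∀ tab top, GoodUpTo A tab0 top0 n tab top → RecPost A tab0 top0 n i tab top := by
  intro i
  induction i using Nat.strong_induction_on with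
  | _ i IH =>
  intro hlt hlp n hin tab top hG
  obtain ⟨hLt, hLp, hGj⟩ := hG
  unfold RecPost
  by_cases h0 : i = 0
  · subst h0
    have hb : blockTowerRec A tab top 0 = (0, tab.set 0 0, top.set 0 (PySem.List.pyGetD A 0 pvD0)) := by
      rw [blockTowerRec.eq_def]
      simp [PySem.List.pySetD_of_nonneg]
    have hs0 : specVT A tab0 top0 0 = (0, PySem.List.pyGetD A 0 pvD0) := by
      rw [specVT]; simp
    have h0t : 0 < tab.length := by omega
    have h0p : 0 < top.length := by omega
    rw [hb, hs0]
    refine ⟨rfl, ⟨by simp [hLt], by simp [hLp], ?_⟩, ?_, ?_, ?_⟩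
    · intro j hj
      by_cases hj0 : j = 0
      · subst hj0
        right
        rw [hs0, pvGetD_set_self _ _ _ _ h0t, pvGetD_set_self _ _ _ _ h0p]
        exact ⟨rfl, rfl⟩
      · rw [pvGetD_set_ne _ _ _ _ _ hj0, pvGetD_set_ne _ _ _ _ _ hj0]
        exact hGj j hj
    · exact pvGetD_set_self _ _ _ _ h0t
    · exact pvGetD_set_self _ _ _ _ h0p
    · intro m hm
      have hm0 : m ≠ 0 := by omega
      exact ⟨pvGetD_set_ne _ _ _ _ _ hm0, pvGetD_set_ne _ _ _ _ _ hm0⟩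
  · by_cases hmemo : tab.getD i 0 = -1
    · -- entry i is recomputed
      have htab0 : tab0.getD i 0 = -1 := by
        rcases hGj i hin with ⟨e1, _⟩ | ⟨e1, _⟩
        · rw [← e1]; exact hmemo
        · by_contra hne
          have hsp' : specVT A tab0 top0 i = (tab0.getD i 0, top0.getD i pvD0) := by
            rw [specVT]; simp only [PySem.List.pyGetD_natCast]; rw [dif_neg h0, if_neg hne]
          rw [e1, hsp'] at hmemo
          exact hne hmemo
      have hsp : specVT A tab0 top0 i =
          (pyMin3 ((specVT A tab0 top0 (i-1)).1 + 1) (specMin A tab0 top0 i 0 i none) (i : Int),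
           if pyMin3 ((specVT A tab0 top0 (i-1)).1 + 1) (specMin A tab0 top0 i 0 i none) (i : Int)
                = (specVT A tab0 top0 (i-1)).1 + 1
           then (specVT A tab0 top0 (i-1)).2 else A.getD i pvD0) := by
        rw [specVT]; simp only [PySem.List.pyGetD_natCast]; rw [dif_neg h0, if_pos htab0]
      set s := blockTowerLoop A tab top i 0 i none with hs_def
      set r1 := blockTowerRec A s.1 s.2.1 (i - 1) with hr1_def
      set nv := pyMin3 (r1.1 + 1) s.2.2 (i : Int) with hnv_def
      set tab2 := r1.2.1.set i nv with htab2_def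
      set r2 := blockTowerRec A tab2 r1.2.2 (i - 1) with hr2_def
      set top3 := (if nv = r2.1 + 1 then r2.2.2.set i (r2.2.2.getD (i - 1) pvD0)
                   else r2.2.2.set i (A.getD i pvD0)) with htop3_def
      have hb : blockTowerRec A tab top i = (r2.2.1.getD i 0, r2.2.1, top3) := by
        rw [blockTowerRec.eq_def]
        have hc1 : ((i : Int) - 1) = ((i - 1 : Nat) : Int) := by omega
        simp only [hc1, PySem.List.pyGetD_natCast, PySem.List.pySetD_natCast]
        rw [dif_neg h0, if_pos hmemo]
      -- the loop over j < i
      obtain ⟨sG, smt, spres⟩ := loop_post A tab0 top0 i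
        (fun j hj n' hn' tab' top' hG' => IH j hj (by omega) (by omega) n' hn' tab' top' hG')
        i 0 none tab top n (by omega) (by omega) ⟨hLt, hLp, hGj⟩
      -- first recursive call at i-1
      obtain ⟨R1v, R1G, R1tab, R1top, R1pres⟩ :=
        IH (i-1) (by omega) (by omega) (by omega) n (by omega) s.1 s.2.1 sG
      have hlen1 : r1.2.1.length = tab0.length := R1G.1
      have hlen1p : r1.2.2.length = top0.length := R1G.2.1
      have hGood2 : GoodUpTo A tab0 top0 i tab2 r1.2.2 := by
        refine ⟨by simp [htab2_def, hlen1], hlen1p, ?_⟩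
        intro j hj
        rw [htab2_def, pvGetD_set_ne _ _ _ _ _ (by omega : j ≠ i)]
        exact R1G.2.2 j (by omega)
      -- second recursive call at i-1
      obtain ⟨R2v, R2G, R2tab, R2top, R2pres⟩ :=
        IH (i-1) (by omega) (by omega) (by omega) i (by omega) tab2 r1.2.2 hGood2
      have hlen2 : r2.2.1.length = tab0.length := R2G.1
      have hlen2p : r2.2.2.length = top0.length := R2G.2.1
      have htab2i : tab2.getD i 0 = nv := by
        rw [htab2_def]; exact pvGetD_set_self _ _ _ _ (by omega : i < r1.2.1.length)
      have hr2i : r2.2.1.getD i 0 = nv := (R2pres i (by omega)).1.trans htab2i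
      have hnewv : nv = (specVT A tab0 top0 i).1 := by
        rw [hnv_def, R1v, smt, hsp]
      have hfst : (specVT A tab0 top0 i).1
          = pyMin3 ((specVT A tab0 top0 (i-1)).1 + 1) (specMin A tab0 top0 i 0 i none) (i : Int) := by
        rw [hsp]
      have hsnd : (specVT A tab0 top0 i).2
          = if (specVT A tab0 top0 i).1 = (specVT A tab0 top0 (i-1)).1 + 1
            then (specVT A tab0 top0 (i-1)).2 else A.getD i pvD0 := by
        rw [hsp, ← hfst, hsp]
      have htop3i : top3.getD i pvD0 = (specVT A tab0 top0 i).2 := by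
        rw [htop3_def]
        by_cases hc : nv = r2.1 + 1
        · rw [if_pos hc, pvGetD_set_self _ _ _ _ (by omega : i < r2.2.2.length), R2top, hsnd,
            if_pos (by rw [← hnewv, hc, R2v])]
        · rw [if_neg hc, pvGetD_set_self _ _ _ _ (by omega : i < r2.2.2.length), hsnd,
            if_neg (by rw [← hnewv]; rw [R2v] at hc; exact hc)]
      have htop3ne : ∀ m : Nat, m ≠ i → top3.getD m pvD0 = r2.2.2.getD m pvD0 := by
        intro m hmne
        rw [htop3_def]
        by_cases hc : nv = r2.1 + 1
        · rw [if_pos hc, pvGetD_set_ne _ _ _ _ _ hmne]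
        · rw [if_neg hc, pvGetD_set_ne _ _ _ _ _ hmne]
      have hchain : ∀ m : Nat, i < m →
          r2.2.1.getD m 0 = tab.getD m 0 ∧ top3.getD m pvD0 = top.getD m pvD0 := by
        intro m hm
        constructor
        · rw [(R2pres m (by omega)).1, htab2_def, pvGetD_set_ne _ _ _ _ _ (by omega : m ≠ i),
            (R1pres m (by omega)).1, (spres m (by omega)).1]
        · rw [htop3ne m (by omega), (R2pres m (by omega)).2, (R1pres m (by omega)).2,
            (spres m (by omega)).2]
      rw [hb]
      refine ⟨by rw [hr2i, hnewv], ⟨hlen2, by simp [htop3_def]; split_ifs <;> simp [hlen2p], ?_⟩,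
        by rw [hr2i, hnewv], htop3i, hchain⟩
      intro j hj
      rcases Nat.lt_trichotomy j i with hji | hji | hji
      · have := R2G.2.2 j hji
        rw [htop3ne j (by omega)]
        exact this
      · subst hji
        right
        exact ⟨by rw [hr2i, hnewv], htop3i⟩
      · have hc := hchain j hji
        rw [hc.1, hc.2]
        exact hGj j hj
    · -- memo hit: tab[i] already set
      have hb : blockTowerRec A tab top i = (tab.getD i 0, tab, top) := by
        rw [blockTowerRec.eq_def]
        simp only [PySem.List.pyGetD_natCast]
        rw [dif_neg h0, if_neg hmemo]
      have hvals : tab.getD i 0 = (specVT A tab0 top0 i).1 ∧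
          top.getD i pvD0 = (specVT A tab0 top0 i).2 := by
        rcases hGj i hin with ⟨e1, e2⟩ | h
        · have hne : ¬ tab0.getD i 0 = -1 := by rw [← e1]; exact hmemo
          have hsp' : specVT A tab0 top0 i = (tab0.getD i 0, top0.getD i pvD0) := by
            rw [specVT]; simp only [PySem.List.pyGetD_natCast]; rw [dif_neg h0, if_neg hne]
          rw [hsp', e1, e2]
          exact ⟨rfl, rfl⟩
        · exact h
      rw [hb]
      exact ⟨hvals.1, ⟨hLt, hLp, hGj⟩, hvals.1, hvals.2, fun m _ => ⟨rfl, rfl⟩⟩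

-- B side
lemma alt_inner_eq (A : List (Int × Int)) (tab0 : List Int) (top0 : List (Int × Int)) (jN : Nat)
    (tab : List Int) (top : List (Int × Int))
    (hk : ∀ k : Nat, k < jN → tab.getD k 0 = (specVT A tab0 top0 k).1 ∧ top.getD k pvD0 = (specVT A tab0 top0 k).2) :
    ∀ r k best, k + r ≤ jN →
      blockTowerAltInner A tab top jN k r best = specMin A tab0 top0 jN k r best := by
  intro r
  induction r with
  | zero => intro k best _; rw [specMin.eq_def]; rfl
  | succ r' ihr =>
    intro k best hkr
    obtain ⟨h1, h2⟩ := hk k (by omega)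
    rw [blockTowerAltInner.eq_def, specMin.eq_def]
    simp only [PySem.List.pyGetD_natCast, h1, h2]
    rw [ihr (k + 1) _ (by omega)]
    congr 1
    by_cases hU : upperFn (A[jN]?.getD pvD0) (specVT A tab0 top0 k).2 = true
    · cases best with
      | none => simp [hU, pyMinOpt, infGt]
      | some m =>
        by_cases hbm : (specVT A tab0 top0 k).1 + ((jN : Int) - (k : Int) - 1) < m
        · simp [hU, hbm, pyMinOpt, infGt, min_eq_right (le_of_lt hbm)]
        · simp [hU, hbm, pyMinOpt, infGt,
            min_eq_left (by omega : m ≤ (specVT A tab0 top0 k).1 + ((jN : Int) - (k : Int) - 1))]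
    · cases best <;> simp [hU]

def BInv (A : List (Int × Int)) (tab0 : List Int) (top0 : List (Int × Int)) (j : Nat)
    (tab : List Int) (top : List (Int × Int)) : Prop :=
  tab.length = tab0.length ∧ top.length = top0.length ∧
  (∀ k : Nat, k < j → tab.getD k 0 = (specVT A tab0 top0 k).1 ∧ top.getD k pvD0 = (specVT A tab0 top0 k).2) ∧
  (∀ m : Nat, j ≤ m → tab.getD m 0 = tab0.getD m 0 ∧ top.getD m pvD0 = top0.getD m pvD0)

lemma alt_loop_post (A : List (Int × Int)) (tab0 : List Int) (top0 : List (Int × Int)) :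
    ∀ r j tab top, 1 ≤ j → j + r ≤ tab0.length → j + r ≤ top0.length →
      BInv A tab0 top0 j tab top →
      BInv A tab0 top0 (j + r) (blockTowerAltLoop A tab top j r).1 (blockTowerAltLoop A tab top j r).2 := by
  intro r
  induction r with
  | zero =>
    intro j tab top _ _ _ hB
    simpa [blockTowerAltLoop] using hB
  | succ r' ihr =>
    intro j tab top hj hlt hlp hB
    obtain ⟨hLt, hLp, hdone, horig⟩ := hB
    have hjt : j < tab.length := by omega
    have hjp : j < top.length := by omega
    have hj0 : j ≠ 0 := by omega
    have hcur : tab.getD j 0 = tab0.getD j 0 := (horig j le_rfl).1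
    have hjj : j + (r' + 1) = (j + 1) + r' := by omega
    rw [hjj]
    by_cases hm : tab.getD j 0 = -1
    · -- entry j gets computed
      have hm0 : tab0.getD j 0 = -1 := hcur ▸ hm
      have hstep : blockTowerAltLoop A tab top j (r' + 1) =
          blockTowerAltLoop A
            (tab.set j (pyMin3 (tab.getD (j-1) 0 + 1) (blockTowerAltInner A tab top j 0 j none) (j : Int)))
            (top.set j (if pyMin3 (tab.getD (j-1) 0 + 1) (blockTowerAltInner A tab top j 0 j none) (j : Int)
                  = tab.getD (j-1) 0 + 1
              then top.getD (j-1) pvD0 else PySem.List.pyGetD A (j : Int) pvD0))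
            (j + 1) r' := by
        rw [blockTowerAltLoop.eq_def]
        have hc1 : ((j : Int) - 1) = ((j - 1 : Nat) : Int) := by omega
        simp only [hc1, PySem.List.pyGetD_natCast, PySem.List.pySetD_natCast]
        rw [if_pos hm]
      rw [hstep]
      have hinner : blockTowerAltInner A tab top j 0 j none = specMin A tab0 top0 j 0 j none :=
        alt_inner_eq A tab0 top0 j tab top (fun k hk => hdone k hk) j 0 none (by omega)
      have hprev : tab.getD (j-1) 0 = (specVT A tab0 top0 (j-1)).1 := (hdone (j-1) (by omega)).1
      have hprevT : top.getD (j-1) pvD0 = (specVT A tab0 top0 (j-1)).2 := (hdone (j-1) (by omega)).2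
      have hsp : specVT A tab0 top0 j =
          (pyMin3 ((specVT A tab0 top0 (j-1)).1 + 1) (specMin A tab0 top0 j 0 j none) (j : Int),
           if pyMin3 ((specVT A tab0 top0 (j-1)).1 + 1) (specMin A tab0 top0 j 0 j none) (j : Int)
                = (specVT A tab0 top0 (j-1)).1 + 1
           then (specVT A tab0 top0 (j-1)).2 else PySem.List.pyGetD A (j : Int) pvD0) := by
        rw [specVT]
        simp only [PySem.List.pyGetD_natCast]
        rw [dif_neg hj0, if_pos hm0]
      rw [hinner, hprev, hprevT]
      have hBnew : BInv A tab0 top0 (j + 1)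
          (tab.set j (specVT A tab0 top0 j).1) (top.set j (specVT A tab0 top0 j).2) := by
        refine ⟨by simp [hLt], by simp [hLp], ?_, ?_⟩
        · intro k hk
          by_cases hkj : k = j
          · subst hkj
            rw [pvGetD_set_self _ _ _ _ hjt, pvGetD_set_self _ _ _ _ hjp]
            exact ⟨rfl, rfl⟩
          · rw [pvGetD_set_ne _ _ _ _ _ hkj, pvGetD_set_ne _ _ _ _ _ hkj]
            exact hdone k (by omega)
        · intro m hmge
          have hmj : m ≠ j := by omega
          rw [pvGetD_set_ne _ _ _ _ _ hmj, pvGetD_set_ne _ _ _ _ _ hmj]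
          exact horig m (by omega)
      have hset1 : pyMin3 ((specVT A tab0 top0 (j-1)).1 + 1) (specMin A tab0 top0 j 0 j none) (j : Int)
            = (specVT A tab0 top0 j).1 := by
        rw [hsp]
      have hset2 : (if pyMin3 ((specVT A tab0 top0 (j-1)).1 + 1) (specMin A tab0 top0 j 0 j none) (j : Int)
                = (specVT A tab0 top0 (j-1)).1 + 1
           then (specVT A tab0 top0 (j-1)).2 else PySem.List.pyGetD A (j : Int) pvD0) = (specVT A tab0 top0 j).2 := by
        rw [hsp]
      rw [hset2, hset1]
      exact ihr (j + 1) _ _ (by omega) (by omega) (by omega) hBnew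
    · -- entry j keeps its preset value
      have hm0 : ¬ tab0.getD j 0 = -1 := by rw [← hcur]; exact hm
      have hstep : blockTowerAltLoop A tab top j (r' + 1) = blockTowerAltLoop A tab top (j + 1) r' := by
        rw [blockTowerAltLoop.eq_def]
        simp only [PySem.List.pyGetD_natCast]
        rw [if_neg hm]
      rw [hstep]
      have hspj : specVT A tab0 top0 j = (tab0.getD j 0, top0.getD j pvD0) := by
        rw [specVT]
        simp only [PySem.List.pyGetD_natCast]
        rw [dif_neg hj0, if_neg hm0]
      have hBnew : BInv A tab0 top0 (j + 1) tab top := by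
        refine ⟨hLt, hLp, ?_, fun m hmge => horig m (by omega)⟩
        intro k hk
        by_cases hkj : k = j
        · subst hkj
          rw [hspj]
          exact ⟨hcur, (horig k le_rfl).2⟩
        · exact hdone k (by omega)
      exact ihr (j + 1) _ _ (by omega) (by omega) (by omega) hBnew

-- ===== VERDICT (by name: the statement is the Claim_ definition above) =====
lemma pvSetD_zero {α : Type} (xs : List α) (v : α) :
    PySem.List.pySetD xs 0 v = xs.set 0 v := by
  rw [PySem.List.pySetD_of_nonneg xs v le_rfl]
  rfl

lemma spec0 (A : List (Int × Int)) (tab0 : List Int) (top0 : List (Int × Int)) :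
    specVT A tab0 top0 0 = (0, A.getD 0 pvD0) := by
  rw [specVT]
  simp [PySem.List.pyGetD_zero]

theorem block_tower_spec : Claim_equal_block_tower := by
  intro A tab top i _hDom hPre
  unfold Spec_block_tower
  obtain ⟨hinr, himp⟩ := hPre
  unfold PySem.Raise.InRange at hinr
  by_cases hi0 : 0 ≤ i
  case neg =>
    -- negative i, necessarily a memo hit inside Pre_: both return tab[i] (Python wraparound)
    have hm : ¬ PySem.List.pyGetD tab i 0 = -1 := fun h => absurd (himp (Or.inr h)).1 hi0
    have hA1 : block_tower A tab top i = PySem.List.pyGetD tab i 0 := by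
      unfold block_tower
      rw [if_neg hi0, if_neg hm]
    have hB1 : block_tower_alt A tab top i = PySem.List.pyGetD tab i 0 := by
      unfold block_tower_alt
      rw [if_pos ⟨by omega, hm⟩]
    rw [hA1, hB1]
  case pos =>
  have hilen : i < (tab.length : Int) := hinr.2
  obtain ⟨iN, rfl⟩ : ∃ n : Nat, i = (n : Int) := ⟨i.toNat, (Int.toNat_of_nonneg hi0).symm⟩
  by_cases h0 : iN = 0
  · subst h0
    obtain ⟨_, _hA, hT⟩ := himp (Or.inl rfl)
    have hlt : 0 < tab.length := by omega
    have hlp : 0 < top.length := by omega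
    have hA1 : block_tower A tab top 0 = 0 := by
      unfold block_tower
      rw [if_pos (le_refl (0 : Int))]
      rw [blockTowerRec.eq_def]
      simp
    have hB1 : block_tower_alt A tab top 0 = 0 := by
      unfold block_tower_alt
      rw [if_neg (by simp)]
      simp only [pvSetD_zero, Int.toNat_zero]
      rw [blockTowerAltLoop.eq_def]
      simp only [PySem.List.pyGetD_zero]
      exact pvGetD_set_self _ _ _ _ hlt
    simpa using hA1.trans hB1.symm
  · by_cases hmemo : PySem.List.pyGetD tab (iN : Int) 0 = -1
    · -- entry iN must be computed: both sides equal (specVT A tab top iN).1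
      obtain ⟨_, _hA, hT⟩ := himp (Or.inr hmemo)
      have hlt : iN < tab.length := by omega
      have hlp : iN < top.length := by omega
      have hG0 : GoodUpTo A tab top (iN + 1) tab top :=
        ⟨rfl, rfl, fun j _ => Or.inl ⟨rfl, rfl⟩⟩
      obtain ⟨RAv, _, _, _, _⟩ :=
        rec_post A tab top iN hlt hlp (iN + 1) (by omega) tab top hG0
      have hA1 : block_tower A tab top (iN : Int) = (specVT A tab top iN).1 := by
        unfold block_tower
        rw [if_pos hi0]
        rw [show ((iN : Int)).toNat = iN from Int.toNat_natCast iN]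
        exact RAv
      have hB1 : block_tower_alt A tab top (iN : Int) = (specVT A tab top iN).1 := by
        unfold block_tower_alt
        rw [if_neg (by simp [hmemo])]
        simp only [pvSetD_zero, PySem.List.pyGetD_zero, Int.toNat_natCast,
          PySem.List.pyGetD_natCast]
        have hBinv : BInv A tab top 1 (tab.set 0 0) (top.set 0 (A.getD 0 pvD0)) := by
          refine ⟨by simp, by simp, ?_, ?_⟩
          · intro k hk
            have hk0 : k = 0 := by omega
            subst hk0
            rw [spec0, pvGetD_set_self _ _ _ _ (by omega : 0 < tab.length),
              pvGetD_set_self _ _ _ _ (by omega : 0 < top.length)]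
            exact ⟨rfl, rfl⟩
          · intro m hm
            have hm0 : m ≠ 0 := by omega
            rw [pvGetD_set_ne _ _ _ _ _ hm0, pvGetD_set_ne _ _ _ _ _ hm0]
            exact ⟨rfl, rfl⟩
        obtain ⟨_, _, hdone, _⟩ :=
          alt_loop_post A tab top iN 1 (tab.set 0 0) (top.set 0 (A.getD 0 pvD0))
            le_rfl (by omega) (by omega) hBinv
        exact (hdone iN (by omega)).1
      rw [hA1, hB1]
    · -- memo hit: both return tab[iN]
      have hA1 : block_tower A tab top (iN : Int) = PySem.List.pyGetD tab (iN : Int) 0 := by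
        unfold block_tower
        rw [if_pos hi0]
        rw [blockTowerRec.eq_def]
        rw [dif_neg (by omega : ¬ ((iN : Int)).toNat = 0)]
        rw [show (((((iN : Int)).toNat : Nat)) : Int) = (iN : Int) by omega]
        rw [if_neg hmemo]
      have hB1 : block_tower_alt A tab top (iN : Int) = PySem.List.pyGetD tab (iN : Int) 0 := by
        unfold block_tower_alt
        rw [if_pos ⟨by exact_mod_cast h0, hmemo⟩]
      rw [hA1, hB1]
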